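-- pv_equiv track=rewrite | github.com/chenyang1999/MyComputerCollegeCourses | CS116课后题/06/a06_interface/a06q4.py | dg
-- ===== SOURCE A (Python) =====
-- def palindrome(s):
--   if s==s[::-1]:
--     return True
--   else:
--     return False
--
-- def dg(s,i,k):
--   if i+k<len(s):
--     if palindrome(s[:i]+s[i+k:]):
--       return True
--     else:
--       return dg(s,i+1,k)
--   else:
--     return False
-- ===== SOURCE B (Python) =====
-- def dg(s, i, k):
--     # Window-scan without building any strings: for each window start j,
--     # test palindromicity of s with s[j:j+k] deleted by mapping the
--     # deleted-string positions back into s (two-pointer half scan).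
--     n = len(s)
--     m = n - k
--
--     def ok(j):
--         for x in range(m // 2):
--             a = x if x < j else x + k
--             b = m - 1 - x
--             if b >= j:
--                 b += k
--             if s[a] != s[b]:
--                 return False
--         return True
--
--     j = i
--     while j + k < n:
--         if ok(j):
--             return True
--         j += 1
--     return False
-- ===== Notes on version B (the rewrite author's own statement) =====
-- stated objective: alternative
-- what changed: A recursively slices, concatenates and reverses a fresh string for every window start; B iterates over window starts and checks palindromicity in place by mapping deleted-string positions back into s with index arithmetic and a half-length pair scan with early exit, building no strings at all.
-- outside the precondition, e.g. on dg('ab', -2, 2): A returns False, B returns True; on dg('a', -2, -2): A returns True, B raises IndexError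
import Mathlib
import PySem

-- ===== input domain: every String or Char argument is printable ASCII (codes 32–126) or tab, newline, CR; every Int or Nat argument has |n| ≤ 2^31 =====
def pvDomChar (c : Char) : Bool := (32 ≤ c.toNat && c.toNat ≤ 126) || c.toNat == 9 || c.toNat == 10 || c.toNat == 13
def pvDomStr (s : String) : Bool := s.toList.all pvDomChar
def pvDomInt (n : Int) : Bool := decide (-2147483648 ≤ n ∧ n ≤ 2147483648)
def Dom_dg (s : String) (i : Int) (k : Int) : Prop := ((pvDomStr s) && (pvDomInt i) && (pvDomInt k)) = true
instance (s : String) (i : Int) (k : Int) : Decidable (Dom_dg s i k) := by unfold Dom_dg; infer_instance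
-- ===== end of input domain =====

-- B scans window starts without building any strings: it maps the positions of the
-- deleted string back into s and does a half-length index-pair palindrome check,
-- where A slices, concatenates and reverses a fresh string per window.

-- ===== PORT A =====
-- Python: s == s[::-1]; s[::-1] is reversal (PySem.List.slice?_none_none_neg_one)
def pvPalindrome (t : List Char) : Bool :=
  if t == t.reverse then true else false

def pvDgA (cs : List Char) (i : Int) (k : Int) : Bool :=
  if h : i + k < (cs.length : Int) then
    if pvPalindrome (PySem.List.slice cs none (some i) ++ PySem.List.slice cs (some (i + k)) none) then
      true
    else
      pvDgA cs (i + 1) k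
  else
    false
termination_by ((cs.length : Int) - (i + k)).toNat
decreasing_by omega

def dg (s : String) (i : Int) (k : Int) : Bool := pvDgA s.toList i k

-- ===== PORT B =====
-- inner 'for x in range(m // 2)' loop of Source B (s[a] != s[b] compared via pyGet?;
-- exact wherever Python does not raise IndexError, i.e. on all of Pre_)
def pvOk (cs : List Char) (k : Int) (m : Int) (j : Int) : Bool :=
  (PySem.List.pyRange 0 (PySem.Int.floordiv m 2) 1).all fun x =>
    let a := if x < j then x else x + k
    let b0 := m - 1 - x
    let b := if j ≤ b0 then b0 + k else b0
    PySem.List.pyGet? cs a == PySem.List.pyGet? cs b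

-- the 'while j + k < n' loop of Source B
def pvDgB (cs : List Char) (k : Int) (m : Int) (j : Int) : Bool :=
  if h : j + k < (cs.length : Int) then
    if pvOk cs k m j then true else pvDgB cs k m (j + 1)
  else
    false
termination_by ((cs.length : Int) - (j + k)).toNat
decreasing_by omega

def dg_alt (s : String) (i : Int) (k : Int) : Bool :=
  pvDgB s.toList k ((s.toList.length : Int) - k) i

-- ===== PRECONDITION & SPEC =====
-- Pre_ excludes negative i or k with i+k < len(s) (there A returns values via Python's
-- accidental negative-slice wraparound, or raises RecursionError for very negative
-- arguments), where B's direct indexing naturally raises IndexError or disagrees.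
def Pre_dg (s : String) (i : Int) (k : Int) : Prop :=
  (0 ≤ i ∧ 0 ≤ k) ∨ (s.toList.length : Int) ≤ i + k
instance (s : String) (i : Int) (k : Int) : Decidable (Pre_dg s i k) := by
  unfold Pre_dg; infer_instance

def pvWitness_dg : String × Int × Int := ("abca", 0, 1)

def Spec_dg (s : String) (i : Int) (k : Int) (out : Bool) : Prop := out = dg_alt s i k
instance (s : String) (i : Int) (k : Int) (out : Bool) : Decidable (Spec_dg s i k out) := by
  unfold Spec_dg; infer_instance

-- ===== CLAIM (what is proved, stated in full; the proofs are below) =====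
def Claim_equal_dg : Prop :=
  ∀ (s : String) (i : Int) (k : Int), Dom_dg s i k → Pre_dg s i k → Spec_dg s i k (dg s i k)

-- ===== LEMMAS AND PROOFS =====

-- half-scan characterisation of palindromicity
lemma pv_pal_iff_half (l : List Char) :
    (l = l.reverse) ↔ ∀ x, x < l.length / 2 → l[x]? = l[l.length - 1 - x]? := by
  constructor
  · intro h x hx
    conv_lhs => rw [h]
    rw [List.getElem?_reverse (by omega)]
  · intro h
    apply List.ext_getElem?
    intro x
    by_cases hx : x < l.length
    · rw [List.getElem?_reverse hx]
      rcases Nat.lt_trichotomy x (l.length - 1 - x) with hlt | heq | hgt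
      · exact h x (by omega)
      · rw [← heq]
      · have := h (l.length - 1 - x) (by omega)
        have h2 : l.length - 1 - (l.length - 1 - x) = x := by omega
        rw [h2] at this
        exact this.symm
    · rw [List.getElem?_eq_none (by omega), List.getElem?_eq_none (by simp; omega)]

-- indexing the deleted string: (take j ++ drop (j+kk)) at x is cs with the window skipped
lemma pv_del_get (cs : List Char) (j kk x : Nat) (hj : j + kk ≤ cs.length) :
    (cs.take j ++ cs.drop (j + kk))[x]? = cs[if x < j then x else x + kk]? := by
  by_cases hxj : x < j
  · rw [if_pos hxj, List.getElem?_append_left (by simp; omega)]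
    simp [hxj]
  · rw [if_neg hxj, List.getElem?_append_right (by simp; omega), List.getElem?_drop]
    congr 1
    simp
    omega

-- the per-window agreement: A's slice/reverse test equals B's index-pair test
lemma pv_step (cs : List Char) (i k : Int) (hi : 0 ≤ i) (hk : 0 ≤ k)
    (hlt : i + k < (cs.length : Int)) :
    pvPalindrome (PySem.List.slice cs none (some i) ++ PySem.List.slice cs (some (i + k)) none)
      = pvOk cs k ((cs.length : Int) - k) i := by
  obtain ⟨j, rfl⟩ : ∃ j : Nat, (j : Int) = i := ⟨i.toNat, Int.toNat_of_nonneg hi⟩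
  obtain ⟨kk, rfl⟩ : ∃ kk : Nat, (kk : Int) = k := ⟨k.toNat, Int.toNat_of_nonneg hk⟩
  have hjk : j + kk < cs.length := by exact_mod_cast hlt
  have hsl1 : PySem.List.slice cs none (some (j : Int)) = cs.take j :=
    PySem.List.slice_to_natCast cs j
  have hsl2 : PySem.List.slice cs (some ((j : Int) + (kk : Int))) none = cs.drop (j + kk) := by
    rw [← Nat.cast_add]
    exact PySem.List.slice_from_natCast cs (j + kk)
  rw [hsl1, hsl2]
  set t := cs.take j ++ cs.drop (j + kk) with ht
  set M := cs.length - kk with hM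
  have htlen : t.length = M := by simp [ht, hM]; omega
  have hm : (cs.length : Int) - (kk : Int) = (M : Int) := by omega
  rw [hm]
  have hfd : PySem.Int.floordiv (M : Int) 2 = ((M / 2 : Nat) : Int) := by
    exact_mod_cast PySem.Int.floordiv_natCast M 2
  rw [Bool.eq_iff_iff]
  unfold pvOk
  rw [hfd, PySem.List.pyRange_zero_natCast]
  simp only [pvPalindrome, List.all_map, List.all_eq_true, List.mem_range,
    beq_iff_eq, Function.comp, Bool.if_true_left]
  have key : ∀ x : Nat, x < M / 2 →
      (PySem.List.pyGet? cs (if (x : Int) < (j : Int) then (x : Int) else (x : Int) + (kk : Int)) =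
        PySem.List.pyGet? cs
          (if (j : Int) ≤ (M : Int) - 1 - (x : Int) then (M : Int) - 1 - (x : Int) + (kk : Int)
           else (M : Int) - 1 - (x : Int)))
      = (t[x]? = t[M - 1 - x]? : Prop) := by
    intro x hx
    have hxM : x < M := by omega
    have hc1 : (if (x : Int) < (j : Int) then (x : Int) else (x : Int) + (kk : Int))
        = ((if x < j then x else x + kk : Nat) : Int) := by
      split_ifs with h1 h2 h2 <;> push_cast <;> omega
    have hc2 : (if (j : Int) ≤ (M : Int) - 1 - (x : Int) then (M : Int) - 1 - (x : Int) + (kk : Int)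
           else (M : Int) - 1 - (x : Int))
        = ((if M - 1 - x < j then M - 1 - x else M - 1 - x + kk : Nat) : Int) := by
      split_ifs with h1 h2 h2 <;> push_cast <;> omega
    rw [hc1, hc2, PySem.List.pyGet?_natCast, PySem.List.pyGet?_natCast,
      pv_del_get cs j kk x (by omega), pv_del_get cs j kk (M - 1 - x) (by omega)]
  simp only [Bool.or_false, decide_eq_true_eq]
  rw [pv_pal_iff_half t, htlen]
  exact forall_congr' fun x => forall_congr' fun hx => by rw [key x hx]

lemma pv_loop_eq (cs : List Char) (k : Int) (hk : 0 ≤ k) :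
    ∀ i : Int, 0 ≤ i → pvDgA cs i k = pvDgB cs k ((cs.length : Int) - k) i := by
  have H : ∀ fuel : Nat, ∀ i : Int, 0 ≤ i → ((cs.length : Int) - (i + k)).toNat ≤ fuel →
      pvDgA cs i k = pvDgB cs k ((cs.length : Int) - k) i := by
    intro fuel
    induction fuel with
    | zero =>
      intro i hi hf
      rw [pvDgA, pvDgB, dif_neg (by omega), dif_neg (by omega)]
    | succ n ih =>
      intro i hi hf
      rw [pvDgA, pvDgB]
      by_cases h : i + k < (cs.length : Int)
      · rw [dif_pos h, dif_pos h, pv_step cs i k hi hk h]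
        cases pvOk cs k ((cs.length : Int) - k) i with
        | true => simp
        | false => simpa using ih (i + 1) (by omega) (by omega)
      · rw [dif_neg h, dif_neg h]
  intro i hi
  exact H ((cs.length : Int) - (i + k)).toNat i hi le_rfl

-- ===== VERDICT (by name: the statement is the Claim_ definition above) =====
theorem dg_spec : Claim_equal_dg := by
  intro s i k _hdom hpre
  unfold Spec_dg dg dg_alt
  rcases hpre with ⟨hi, hk⟩ | hlen
  · exact pv_loop_eq s.toList k hk i hi
  · rw [pvDgA, pvDgB, dif_neg (by omega), dif_neg (by omega)]
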